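-- pv_equiv track=rewrite | github.com/hrcoC159753/AoC2023 | Day12/day12.py | getLineSpans
-- ===== SOURCE A (Python) =====
-- def getLineSpans(line, groupNumbers):
--     assert sum(groupNumbers) + len(groupNumbers) - 1 <= len(line)
--
--     leftIndexes = []
--     i = 0
--     for groupNumber in groupNumbers:
--         leftIndexes.append(i)
--         i += groupNumber + 1
--
--     rightIndexes = []
--     i = 0
--     for groupNumber in groupNumbers[::-1]:
--         rightIndexes.append(i)
--         i += groupNumber + 1
--
--     return list((leftIndex, rightIndex) for (leftIndex, rightIndex) in zip(leftIndexes, map(lambda x: len(line) - 1 - x, rightIndexes[::-1])))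
-- ===== SOURCE B (Python) =====
-- def getLineSpans(line, groupNumbers):
--     assert sum(groupNumbers) + len(groupNumbers) - 1 <= len(line)
--     total = sum(groupNumbers)
--     k = len(groupNumbers)
--     n = len(line)
--     spans = []
--     prefix = 0
--     for j, g in enumerate(groupNumbers):
--         left = prefix + j
--         prefix += g
--         spans.append((left, n - total - k + prefix + j))
--     return spans
-- ===== Notes on version B (the rewrite author's own statement) =====
-- stated objective: simpler
-- what changed: Replaces the two accumulation loops plus reversed-list/zip/map-lambda recombination with one forward pass maintaining a running prefix sum, computing the right bound by the closed-form formula len(line)-total-k+prefix+j.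
import Mathlib
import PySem

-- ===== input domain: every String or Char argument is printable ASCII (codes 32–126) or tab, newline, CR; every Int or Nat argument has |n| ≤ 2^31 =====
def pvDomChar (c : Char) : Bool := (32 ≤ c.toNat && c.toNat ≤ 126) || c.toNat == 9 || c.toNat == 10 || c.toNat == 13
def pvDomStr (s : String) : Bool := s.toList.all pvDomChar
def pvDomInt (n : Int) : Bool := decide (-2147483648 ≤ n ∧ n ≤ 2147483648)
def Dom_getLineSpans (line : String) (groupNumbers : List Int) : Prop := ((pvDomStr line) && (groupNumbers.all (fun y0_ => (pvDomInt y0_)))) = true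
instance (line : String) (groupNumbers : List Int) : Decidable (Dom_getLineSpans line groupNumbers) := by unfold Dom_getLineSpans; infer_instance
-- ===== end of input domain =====

-- B replaces A's two accumulation loops plus reversed-list/zip/map recombination with one
-- forward pre-sum pass (objective: simpler); return values proved equal wherever A's assert passes.

-- ===== PORT A =====
-- each 'for' loop appending to a list becomes a foldl over (list, i); groupNumbers[::-1] is List.reverse (PySem.List.slice?_none_none_neg_one)
def getLineSpans (line : String) (groupNumbers : List Int) : List (Int × Int) :=
  let leftIndexes := (groupNumbers.foldl
    (fun (acc : List Int × Int) g => (acc.1 ++ [acc.2], acc.2 + g + 1)) ([], 0)).1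
  let rightIndexes := (groupNumbers.reverse.foldl
    (fun (acc : List Int × Int) g => (acc.1 ++ [acc.2], acc.2 + g + 1)) ([], 0)).1
  (leftIndexes.zip (rightIndexes.reverse.map (fun x => PySem.Str.len line - 1 - x))).map
    (fun p => (p.1, p.2))

-- ===== PORT B =====
-- the single enumerate loop of Source B, with its state (pre, j) as arguments
def altGo (n total k : Int) : List Int → Int → Int → List (Int × Int)
  | [], _, _ => []
  | g :: rest, pre, j =>
      (pre + j, n - total - k + (pre + g) + j) :: altGo n total k rest (pre + g) (j + 1)

def getLineSpans_alt (line : String) (groupNumbers : List Int) : List (Int × Int) :=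
  altGo (PySem.Str.len line) groupNumbers.sum (groupNumbers.length : Int) groupNumbers 0 0

-- ===== PRECONDITION & SPEC =====
-- exactly A's assert: outside it Python raises AssertionError
def Pre_getLineSpans (line : String) (groupNumbers : List Int) : Prop :=
  groupNumbers.sum + (groupNumbers.length : Int) - 1 ≤ PySem.Str.len line
instance (line : String) (groupNumbers : List Int) : Decidable (Pre_getLineSpans line groupNumbers) := by unfold Pre_getLineSpans; infer_instance
def pvWitness_getLineSpans : String × List Int := ("##.###", [2, 3])
def Spec_getLineSpans (line : String) (groupNumbers : List Int) (out : List (Int × Int)) : Prop := out = getLineSpans_alt line groupNumbers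
instance (line : String) (groupNumbers : List Int) (out : List (Int × Int)) : Decidable (Spec_getLineSpans line groupNumbers out) := by unfold Spec_getLineSpans; infer_instance

-- ===== CLAIM (what is proved, stated in full; the proofs are below) =====
def Claim_equal_getLineSpans : Prop := ∀ (line : String) (groupNumbers : List Int), Dom_getLineSpans line groupNumbers → Pre_getLineSpans line groupNumbers → Spec_getLineSpans line groupNumbers (getLineSpans line groupNumbers)

-- ===== LEMMAS AND PROOFS =====

-- recursive characterisation of A's index-accumulating loop
def idxs : List Int → Int → List Int
  | [], _ => []
  | g :: rest, i => i :: idxs rest (i + g + 1)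

theorem foldl_idxs (gs : List Int) (acc : List Int) (i : Int) :
    (gs.foldl (fun (acc : List Int × Int) g => (acc.1 ++ [acc.2], acc.2 + g + 1)) (acc, i)).1
      = acc ++ idxs gs i := by
  induction gs generalizing acc i with
  | nil => simp [idxs]
  | cons g rest ih => simp [idxs, ih]

theorem idxs_append (xs ys : List Int) (i : Int) :
    idxs (xs ++ ys) i = idxs xs i ++ idxs ys (i + xs.sum + (xs.length : Int)) := by
  induction xs generalizing i with
  | nil => simp [idxs]
  | cons g rest ih =>
      simp only [List.cons_append, idxs, ih, List.sum_cons, List.length_cons]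
      push_cast
      ring_nf

theorem idxs_reverse_cons (g : Int) (rest : List Int) :
    (idxs (g :: rest).reverse 0).reverse
      = (rest.sum + (rest.length : Int)) :: (idxs rest.reverse 0).reverse := by
  have h : (g :: rest).reverse = rest.reverse ++ [g] := by simp
  rw [h, idxs_append]
  simp [idxs]

theorem altGo_eq (gs : List Int) (L total k p j : Int)
    (ht : total = p + gs.sum) (hk : k = j + (gs.length : Int)) :
    ((idxs gs (p + j)).zip ((idxs gs.reverse 0).reverse.map (fun x => L - 1 - x)))
      = altGo L total k gs p j := by
  induction gs generalizing p j with
  | nil => simp [idxs, altGo]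
  | cons g rest ih =>
      rw [idxs_reverse_cons]
      simp only [idxs, List.map_cons, List.zip_cons_cons, altGo]
      congr 1
      · simp only [List.sum_cons, List.length_cons] at ht hk
        have h2 : L - 1 - (rest.sum + (rest.length : Int)) = L - total - k + (p + g) + j := by
          push_cast at hk; omega
        rw [h2]
      · have := ih (p + g) (j + 1)
          (by simp only [List.sum_cons] at ht; omega)
          (by simp only [List.length_cons] at hk; push_cast at hk ⊢; omega)
        rw [← this]
        ring_nf

-- ===== VERDICT (by name: the statement is the Claim_ definition above) =====
theorem getLineSpans_spec : Claim_equal_getLineSpans := by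
  intro line gs _ _
  unfold Spec_getLineSpans getLineSpans getLineSpans_alt
  simp only [foldl_idxs, List.nil_append]
  have h := altGo_eq gs (PySem.Str.len line) gs.sum (gs.length : Int) 0 0 (by simp) (by simp)
  simp only [add_zero] at h
  simpa only [Prod.mk.eta, List.map_id'] using h
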